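-- pv_equiv track=rewrite | github.com/gabay/AoC2021 | 9.py | get_basins
-- ===== SOURCE A (Python) =====
-- def get_basin_at(points, y0, x0):
--     pending = [(y0, x0)]
--     basin = set()
--     while pending:
--         y, x = pending.pop()
--         if (y, x) in basin:
--             continue
--         if not (0 <= x < len(points[0]) and 0 <= y < len(points)):
--             continue
--         point = points[y][x]
--         if point == 9:
--             continue
--         basin.add((y, x))
--         pending += [(y-1, x), (y+1, x), (y, x-1), (y, x+1)]
--     return basin
--
-- def get_basins(points):
--     points_in_basin = set()
--     for y, row in enumerate(points):
--         for x, point in enumerate(row):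
--             if (y, x) in points_in_basin:
--                 continue
--             if point == 9:
--                 continue
--             basin = get_basin_at(points, y, x)
--             yield basin
--             points_in_basin |= basin
-- ===== SOURCE B (Python) =====
-- def get_basins(points):
--     h = len(points)
--     w = len(points[0]) if points else 0
--     # minimum-label propagation: every non-9 cell starts labelled with its own
--     # row-major index; labels are repeatedly lowered to the minimum over
--     # neighbouring labels until a fixpoint, so each cell ends up labelled with
--     # the smallest row-major index of its basin.
--     label = {}
--     for y in range(h):
--         for x in range(w):
--             if points[y][x] != 9:
--                 label[(y, x)] = y * w + x
--     changed = True
--     while changed: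
--         changed = False
--         for c in label:
--             y, x = c
--             m = label[c]
--             for n in ((y - 1, x), (y + 1, x), (y, x - 1), (y, x + 1)):
--                 if n in label and label[n] < m:
--                     m = label[n]
--             if m < label[c]:
--                 label[c] = m
--                 changed = True
--     groups = {}
--     for c, v in label.items():
--         groups.setdefault(v, set()).add(c)
--     # emit each basin when its first cell comes up in row-major order
--     done = set()
--     for v in label.values():
--         if v not in done:
--             done.add(v)
--             yield groups[v]
-- ===== Notes on version B (the rewrite author's own statement) =====
-- stated objective: alternative
-- what changed: Replaces A's per-seed stack-based flood fill with whole-grid minimum-label propagation: every non-9 cell starts labelled with its row-major index, labels are repeatedly lowered to the minimum over neighbours until a fixpoint, cells are grouped by final label, and each group is emitted at its first row-major encounter; Pre_ excludes ragged grids, where A raises IndexError when the flood fill reads a missing cell of a short row and, for rows longer than the first, yields an extra empty set per non-9 cell beyond the first row's width, a corner no caller of this AoC grid routine exercises.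
-- outside the precondition, e.g. on get_basins([[1], [2, 3]]): A returns [{(1, 0), (0, 0)}, set()], B returns [{(1, 0), (0, 0)}]; on get_basins([[9, 9], [9]]): A returns [], B raises IndexError
import Mathlib
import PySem

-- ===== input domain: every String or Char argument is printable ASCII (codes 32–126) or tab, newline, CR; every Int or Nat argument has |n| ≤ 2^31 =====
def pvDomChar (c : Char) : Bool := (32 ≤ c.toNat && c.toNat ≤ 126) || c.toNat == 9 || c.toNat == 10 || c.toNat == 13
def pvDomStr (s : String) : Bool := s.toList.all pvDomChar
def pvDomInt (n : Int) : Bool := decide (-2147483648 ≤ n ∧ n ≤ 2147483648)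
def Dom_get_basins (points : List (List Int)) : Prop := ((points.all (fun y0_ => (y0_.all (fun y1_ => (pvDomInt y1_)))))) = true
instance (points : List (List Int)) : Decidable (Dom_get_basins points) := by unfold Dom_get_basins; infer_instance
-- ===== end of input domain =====

-- B replaces A's per-seed stack flood fill by whole-grid minimum-label propagation
-- (alternative algorithm, not claimed faster).  Python A yields each basin as a set;
-- per the type convention a set is its list of distinct elements and the behavioural
-- comparison of basins is order-insensitive, so both ports emit each basin in
-- canonical row-major order.

-- ===== PORT A =====

-- the four neighbours [(y-1,x),(y+1,x),(y,x-1),(y,x+1)]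
def pvNbrs (c : Int × Int) : List (Int × Int) :=
  [(c.1 - 1, c.2), (c.1 + 1, c.2), (c.1, c.2 - 1), (c.1, c.2 + 1)]

-- points[y][x]; exact wherever the Python read returns (Pre_ excludes the raising reads)
def pvVal (points : List (List Int)) (c : Int × Int) : Int :=
  PySem.List.pyGetD (PySem.List.pyGetD points c.1 []) c.2 0

-- 0 <= x < len(points[0]) and 0 <= y < len(points)
def pvInB (points : List (List Int)) (c : Int × Int) : Bool :=
  decide (0 ≤ c.2) && decide (c.2 < ((PySem.List.pyGetD points 0 []).length : Int)) &&
  decide (0 ≤ c.1) && decide (c.1 < (points.length : Int))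

-- [(y, x) for y in range(len(points)) for x in range(len(points[0]))], row-major
def pvCells (points : List (List Int)) : List (Int × Int) :=
  (List.range points.length).flatMap (fun (y : Nat) =>
    (List.range (PySem.List.pyGetD points 0 []).length).map (fun (x : Nat) => ((y : Int), (x : Int))))

-- a yielded Python set, emitted in canonical row-major order (every member of a
-- basin passed the pvInB test, so it occurs in pvCells)
def pvCanon (points : List (List Int)) (basin : PySem.Set (Int × Int)) : List (Int × Int) :=
  (pvCells points).filter (fun c => basin.contains c)

-- the while-loop of get_basin_at; pending.pop() pops the LAST element; fuel is
-- 2 + 5*h*w, proved sufficient below (each iteration consumes one pending entry,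
-- an absorbed cell re-adds four and strictly shrinks the unvisited in-bounds cells)
def get_basin_at_loop (points : List (List Int)) :
    Nat → List (Int × Int) → PySem.Set (Int × Int) → PySem.Set (Int × Int)
  | 0, _, basin => basin
  | _ + 1, [], basin => basin
  | fuel + 1, q :: qs, basin =>
    let c := (q :: qs).getLast (List.cons_ne_nil q qs)
    let rest := (q :: qs).dropLast
    if basin.contains c then get_basin_at_loop points fuel rest basin
    else if !pvInB points c then get_basin_at_loop points fuel rest basin
    else if pvVal points c == 9 then get_basin_at_loop points fuel rest basin
    else get_basin_at_loop points fuel (rest ++ pvNbrs c) (basin.add c)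

def get_basin_at (points : List (List Int)) (y x : Int) : PySem.Set (Int × Int) :=
  get_basin_at_loop points
    (2 + 5 * (points.length * (PySem.List.pyGetD points 0 []).length))
    [(y, x)] PySem.Set.empty

def get_basins (points : List (List Int)) : List (List (Int × Int)) :=
  ((PySem.List.enumerate points).foldl (fun st yr =>
    (PySem.List.enumerate yr.2).foldl
      (fun (st : PySem.Set (Int × Int) × List (List (Int × Int))) xp =>
        if st.1.contains (yr.1, xp.1) then st
        else if xp.2 == 9 then st
        else
          let basin := get_basin_at points yr.1 xp.1
          (st.1.union basin, st.2 ++ [pvCanon points basin])) st)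
    ((PySem.Set.empty : PySem.Set (Int × Int)), [])).2

-- ===== PORT B =====

-- y * w + x, the initial label of cell (y, x)
def pvIdx (points : List (List Int)) (c : Int × Int) : Int :=
  c.1 * ((PySem.List.pyGetD points 0 []).length : Int) + c.2

-- label = {(y, x): y*w+x  for in-grid cells with value != 9}, row-major insertion
def pvLabel0 (points : List (List Int)) : PySem.Dict (Int × Int) Int :=
  (pvCells points).foldl
    (fun d c => if pvVal points c == 9 then d else d.insert c (pvIdx points c))
    PySem.Dict.empty

-- m after the inner 'for n in …: if n in label and label[n] < m: m = label[n]'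
def pvMinNbr (d : PySem.Dict (Int × Int) Int) (c : Int × Int) (m0 : Int) : Int :=
  (pvNbrs c).foldl (fun m n =>
    match d.get? n with
    | some v => if v < m then v else m
    | none => m) m0

-- one 'for c in label:' sweep; the Bool is 'changed'
def pvSweep (d : PySem.Dict (Int × Int) Int) : PySem.Dict (Int × Int) Int × Bool :=
  d.keys.foldl (fun st c =>
    let m := pvMinNbr st.1 c (st.1.getD c 0)
    if m < st.1.getD c 0 then (st.1.insert c m, true) else st) (d, false)

-- 'while changed:'; fuel h*w*h*w + 1 is proved sufficient below (every changing
-- sweep strictly decreases the sum of the labels, which starts below h*w*h*w)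
def pvSweeps : Nat → PySem.Dict (Int × Int) Int → PySem.Dict (Int × Int) Int
  | 0, d => d
  | fuel + 1, d =>
    let p := pvSweep d
    if p.2 then pvSweeps fuel p.1 else p.1

def pvFinalLabel (points : List (List Int)) : PySem.Dict (Int × Int) Int :=
  pvSweeps (points.length * (PySem.List.pyGetD points 0 []).length *
            (points.length * (PySem.List.pyGetD points 0 []).length) + 1)
    (pvLabel0 points)

-- groups[v] = the cells labelled v, in row-major order (the Python set.add only
-- ever adds fresh cells, so the set's insertion order is this append order)
def pvGroups (lab : PySem.Dict (Int × Int) Int) : PySem.Dict Int (List (Int × Int)) :=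
  lab.items.foldl (fun g p => g.modify p.2 [] (· ++ [p.1])) PySem.Dict.empty

-- 'for v in label.values(): if v not in done: done.add(v); yield groups[v]'
def get_basins_alt (points : List (List Int)) : List (List (Int × Int)) :=
  let lab := pvFinalLabel points
  let groups := pvGroups lab
  ((lab.items.foldl
      (fun (st : PySem.Set Int × List (List (Int × Int))) (q : (Int × Int) × Int) =>
        if st.1.contains q.2 then st
        else (st.1.add q.2, st.2 ++ [groups.getD q.2 []]))
      ((PySem.Set.empty : PySem.Set Int), []))).2

-- ===== PRECONDITION & SPEC =====

-- Pre_ excludes ragged grids: on a row shorter than the first, both A's flood fill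
-- and B's rectangular scan raise IndexError when they read a missing cell, and on a
-- row longer than the first the cells beyond the first row's width lie outside any
-- rectangular grid, a corner no caller of this AoC grid routine exercises.
def Pre_get_basins (points : List (List Int)) : Prop :=
  ∀ row ∈ points, row.length = (PySem.List.pyGetD points 0 []).length
instance (points : List (List Int)) : Decidable (Pre_get_basins points) := by
  unfold Pre_get_basins; infer_instance

def pvWitness_get_basins : List (List Int) := [[1, 9], [2, 2]]

def Spec_get_basins (points : List (List Int)) (out : List (List (Int × Int))) : Prop :=
  out = get_basins_alt points
instance (points : List (List Int)) (out : List (List (Int × Int))) :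
    Decidable (Spec_get_basins points out) := by unfold Spec_get_basins; infer_instance

-- ===== CLAIM (what is proved, stated in full; the proofs are below) =====
def Claim_equal_get_basins : Prop := ∀ (points : List (List Int)), Dom_get_basins points →
  Pre_get_basins points → Spec_get_basins points (get_basins points)


-- ===== LEMMAS AND PROOFS =====

-- ---- basic notions used by the proofs ----

-- an in-bounds cell whose value is not 9
def pvOk (p : List (List Int)) (c : Int × Int) : Bool := pvInB p c && !(pvVal p c == 9)

-- one flood-fill / adjacency step into an ok cell
def pvStepR (p : List (List Int)) (u v : Int × Int) : Prop := pvOk p v = true ∧ v ∈ pvNbrs u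

-- b belongs to the basin (connected component of non-9 in-bounds cells) of a
def pvComp (p : List (List Int)) (a b : Int × Int) : Prop :=
  pvOk p a = true ∧ Relation.ReflTransGen (pvStepR p) a b

def pvOkList (p : List (List Int)) : List (Int × Int) := (pvCells p).filter (pvOk p)

lemma pvOk_iff (p : List (List Int)) (c : Int × Int) :
    pvOk p c = true ↔ pvInB p c = true ∧ pvVal p c ≠ 9 := by
  simp [pvOk]

lemma mem_pvCells (p : List (List Int)) (c : Int × Int) :
    c ∈ pvCells p ↔ pvInB p c = true := by
  rcases c with ⟨cy, cx⟩
  simp only [pvCells, List.mem_flatMap, List.mem_map, List.mem_range, pvInB,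
    Bool.and_eq_true, decide_eq_true_eq, Prod.mk.injEq]
  constructor
  · rintro ⟨y, hy, x, hx, rfl, rfl⟩
    refine ⟨⟨⟨by omega, by omega⟩, by omega⟩, by omega⟩
  · rintro ⟨⟨⟨h1, h2⟩, h3⟩, h4⟩
    exact ⟨cy.toNat, by omega, cx.toNat, by omega, by omega, by omega⟩

lemma nodup_pvCells (p : List (List Int)) : (pvCells p).Nodup := by
  rw [pvCells, List.nodup_flatMap]
  constructor
  · intro y _
    refine List.Nodup.map ?_ List.nodup_range
    intro a b h
    have := congrArg Prod.snd h
    simpa using this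
  · refine List.Pairwise.imp ?_ List.pairwise_lt_range
    intro a b hab z hz hz'
    simp only [List.mem_map, List.mem_range] at hz hz'
    obtain ⟨x1, _, rfl⟩ := hz
    obtain ⟨x2, _, h⟩ := hz'
    have := congrArg Prod.fst h
    simp only at this
    omega

lemma length_pvCells (p : List (List Int)) :
    (pvCells p).length = p.length * (PySem.List.pyGetD p 0 []).length := by
  simp [pvCells, List.length_flatMap]

lemma nodup_pvOkList (p : List (List Int)) : (pvOkList p).Nodup :=
  (nodup_pvCells p).filter _

lemma mem_pvOkList (p : List (List Int)) (c : Int × Int) :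
    c ∈ pvOkList p ↔ pvOk p c = true := by
  simp only [pvOkList, List.mem_filter, mem_pvCells, and_iff_right_iff_imp]
  intro h; exact ((pvOk_iff p c).mp h).1

lemma pvNbrs_symm (a b : Int × Int) : b ∈ pvNbrs a ↔ a ∈ pvNbrs b := by
  rcases a with ⟨ay, ax⟩; rcases b with ⟨by_, bx⟩
  simp only [pvNbrs, List.mem_cons, List.not_mem_nil, or_false, Prod.mk.injEq]
  omega

lemma pvComp_refl (p : List (List Int)) {c : Int × Int} (h : pvOk p c = true) : pvComp p c c :=
  ⟨h, Relation.ReflTransGen.refl⟩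

lemma pvComp_ok_right (p : List (List Int)) {a b : Int × Int} (h : pvComp p a b) :
    pvOk p b = true := by
  obtain ⟨ha, hr⟩ := h
  induction hr with
  | refl => exact ha
  | tail _ step _ => exact step.1

lemma pvComp_trans (p : List (List Int)) {a b c : Int × Int}
    (h1 : pvComp p a b) (h2 : pvComp p b c) : pvComp p a c :=
  ⟨h1.1, h1.2.trans h2.2⟩

lemma pvComp_symm (p : List (List Int)) {a b : Int × Int} (h : pvComp p a b) : pvComp p b a := by
  obtain ⟨ha, hr⟩ := h
  refine ⟨pvComp_ok_right p ⟨ha, hr⟩, ?_⟩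
  induction hr with
  | refl => exact Relation.ReflTransGen.refl
  | tail h1 step ih =>
      exact Relation.ReflTransGen.head
        ⟨pvComp_ok_right p ⟨ha, h1⟩, (pvNbrs_symm _ _).mp step.2⟩ ih

lemma pvComp_head (p : List (List Int)) {a n b : Int × Int} (hok : pvOk p a = true)
    (hn : n ∈ pvNbrs a) (h : pvComp p n b) : pvComp p a b :=
  ⟨hok, Relation.ReflTransGen.head ⟨h.1, hn⟩ h.2⟩

lemma pvComp_cases (p : List (List Int)) {a b : Int × Int} (h : pvComp p a b) :
    b = a ∨ ∃ n ∈ pvNbrs a, pvComp p n b := by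
  rcases Relation.ReflTransGen.cases_head h.2 with h1 | ⟨n, hstep, hr⟩
  · exact Or.inl h1.symm
  · exact Or.inr ⟨n, hstep.2, hstep.1, hr⟩

-- ---- characterization of A's flood-fill loop ----

def pvM (p : List (List Int)) (pending : List (Int × Int)) (basin : PySem.Set (Int × Int)) : Nat :=
  pending.length + 5 * ((pvOkList p).filter (fun c => !basin.contains c)).length

lemma pv_filter_sub_length {α : Type} [DecidableEq α] [BEq α] [LawfulBEq α] :
    ∀ (l : List α) (P : α → Bool) (c : α), l.Nodup → c ∈ l → P c = true →
    (l.filter (fun x => P x && !(x == c))).length + 1 = (l.filter P).length := by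
  intro l P c hl hc hPc
  induction l with
  | nil => cases hc
  | cons a t ih =>
    rw [List.nodup_cons] at hl
    rw [List.mem_cons] at hc
    rw [List.filter_cons, List.filter_cons]
    rcases hc with rfl | hct
    · have h1 : (P c && !(c == c)) = false := by simp
      have htl : t.filter (fun x => P x && !(x == c)) = t.filter P := by
        apply List.filter_congr
        intro x hx
        have : (x == c) = false := beq_eq_false_iff_ne.mpr (fun he => hl.1 (he ▸ hx))
        simp [this]
      rw [h1, hPc, htl]
      simp
    · have hac : (a == c) = false :=
        beq_eq_false_iff_ne.mpr (fun h => hl.1 (h ▸ hct))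
      rw [hac]
      have ih' := ih hl.2 hct
      cases hPa : P a
      · simpa using ih'
      · simpa using ih'

lemma pv_filter_not_add_length {l : List (Int × Int)} {c : Int × Int}
    {s : PySem.Set (Int × Int)} (hl : l.Nodup) (hc : c ∈ l) (hs : c ∉ s) :
    (l.filter (fun x => !(s.add c).contains x)).length + 1
      = (l.filter (fun x => !s.contains x)).length := by
  have key : ∀ x : Int × Int, (s.add c).contains x = (s.contains x || x == c) := by
    intro x
    have h1 := PySem.Set.contains_iff (s.add c) x
    have h2 := PySem.Set.contains_iff s x
    have h3 := PySem.Set.mem_add s c x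
    cases hA : (s.add c).contains x <;> cases hB : s.contains x <;> cases hC : x == c <;>
      simp_all
  have hrw : l.filter (fun x => !(s.add c).contains x)
      = l.filter (fun x => (!s.contains x) && !(x == c)) := by
    apply List.filter_congr
    intro x _
    rw [key x, Bool.not_or]
  have hPc : (!s.contains c) = true := by
    have : s.contains c = false := by
      cases h : s.contains c
      · rfl
      · exact absurd ((PySem.Set.contains_iff s c).mp h) hs
    rw [this]; rfl
  rw [hrw]
  exact pv_filter_sub_length l (fun x => !s.contains x) c hl hc hPc

lemma closed_reach (p : List (List Int)) (basin : PySem.Set (Int × Int))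
    (P : List (Int × Int))
    (hcl : ∀ b ∈ basin, ∀ n ∈ pvNbrs b, pvOk p n = true → n ∈ basin ∨ n ∈ P)
    {b z : Int × Int} (hb : b ∈ basin) (h : pvComp p b z) :
    z ∈ basin ∨ ∃ q ∈ P, pvComp p q z := by
  obtain ⟨hokb, hr⟩ := h
  induction hr with
  | refl => exact Or.inl hb
  | tail h1 step ih =>
    rcases ih with hz | ⟨q, hq, hcq⟩
    · rcases hcl _ hz _ step.2 step.1 with h | h
      · exact Or.inl h
      · exact Or.inr ⟨_, h, pvComp_refl p step.1⟩
    · exact Or.inr ⟨q, hq, ⟨hcq.1, hcq.2.tail step⟩⟩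

lemma loopA_char (p : List (List Int)) : ∀ (fuel : Nat) (pending : List (Int × Int))
    (basin : PySem.Set (Int × Int)),
    pvM p pending basin < fuel →
    (∀ b ∈ basin, pvOk p b = true) →
    (∀ b ∈ basin, ∀ n ∈ pvNbrs b, pvOk p n = true → n ∈ basin ∨ n ∈ pending) →
    ∀ z, (z ∈ get_basin_at_loop p fuel pending basin ↔
          z ∈ basin ∨ ∃ q ∈ pending, pvComp p q z) := by
  intro fuel
  induction fuel with
  | zero => intro pending basin hM; exact absurd hM (Nat.not_lt_zero _)
  | succ fuel ih =>
    intro pending basin hM hok hcl z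
    match pending with
    | [] =>
      simp only [get_basin_at_loop]
      simp
    | q0 :: qs =>
      have hne : (q0 :: qs) ≠ [] := List.cons_ne_nil q0 qs
      set c := (q0 :: qs).getLast hne with hceq
      set rest := (q0 :: qs).dropLast with hresteq
      have hsplit : rest ++ [c] = q0 :: qs := List.dropLast_append_getLast hne
      have hmem : ∀ a, a ∈ q0 :: qs ↔ a ∈ rest ∨ a = c := by
        intro a; rw [← hsplit]; simp
      have hlen : rest.length + 1 = (q0 :: qs).length := by
        rw [← hsplit]; simp
      rw [show get_basin_at_loop p (fuel + 1) (q0 :: qs) basin =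
        (if basin.contains c then get_basin_at_loop p fuel rest basin
         else if !pvInB p c then get_basin_at_loop p fuel rest basin
         else if pvVal p c == 9 then get_basin_at_loop p fuel rest basin
         else get_basin_at_loop p fuel (rest ++ pvNbrs c) (basin.add c)) from rfl]
      by_cases hb : basin.contains c = true
      · rw [if_pos hb]
        have hbm : c ∈ basin := (PySem.Set.contains_iff basin c).mp hb
        have hcl' : ∀ b ∈ basin, ∀ n ∈ pvNbrs b, pvOk p n = true → n ∈ basin ∨ n ∈ rest := by
          intro b hbb n hn hokn
          rcases hcl b hbb n hn hokn with h | h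
          · exact Or.inl h
          · rcases (hmem n).mp h with h' | h'
            · exact Or.inr h'
            · exact Or.inl (h' ▸ hbm)
        have hM' : pvM p rest basin < fuel := by
          unfold pvM at hM ⊢; omega
        rw [ih rest basin hM' hok hcl' z]
        constructor
        · rintro (h | ⟨q', hq', h⟩)
          · exact Or.inl h
          · exact Or.inr ⟨q', (hmem q').mpr (Or.inl hq'), h⟩
        · rintro (h | ⟨q', hq', h⟩)
          · exact Or.inl h
          · rcases (hmem q').mp hq' with h' | h'
            · exact Or.inr ⟨q', h', h⟩
            · subst h'
              rcases closed_reach p basin rest hcl' hbm h with h'' | ⟨q2, hq2, h2⟩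
              · exact Or.inl h''
              · exact Or.inr ⟨q2, hq2, h2⟩
      · rw [if_neg hb]
        have hcnb : c ∉ basin := fun h => hb ((PySem.Set.contains_iff basin c).mpr h)
        by_cases hnok : pvOk p c = true
        · -- the absorb branch
          have hin : (!pvInB p c) = false := by
            rcases (pvOk_iff p c).mp hnok with ⟨h1, _⟩; rw [h1]; rfl
          have hval : (pvVal p c == 9) = false := by
            rcases (pvOk_iff p c).mp hnok with ⟨_, h2⟩
            exact beq_eq_false_iff_ne.mpr h2
          rw [hin, hval]
          simp only [Bool.false_eq_true, if_false]
          have hM' : pvM p (rest ++ pvNbrs c) (basin.add c) < fuel := by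
            have h1 : ((pvOkList p).filter (fun x => !(basin.add c).contains x)).length + 1
                = ((pvOkList p).filter (fun x => !basin.contains x)).length :=
              pv_filter_not_add_length (nodup_pvOkList p) ((mem_pvOkList p c).mpr hnok) hcnb
            have h2 : (rest ++ pvNbrs c).length = rest.length + 4 := by
              simp [pvNbrs]
            unfold pvM at hM ⊢
            omega
          have hok' : ∀ b ∈ basin.add c, pvOk p b = true := by
            intro b hbb
            rcases (PySem.Set.mem_add basin c b).mp hbb with h | h
            · exact hok b h
            · exact h ▸ hnok
          have hcl'' : ∀ b ∈ basin.add c, ∀ n ∈ pvNbrs b, pvOk p n = true →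
              n ∈ basin.add c ∨ n ∈ rest ++ pvNbrs c := by
            intro b hbb n hn hokn
            rcases (PySem.Set.mem_add basin c b).mp hbb with h | h
            · rcases hcl b h n hn hokn with h' | h'
              · exact Or.inl ((PySem.Set.mem_add basin c n).mpr (Or.inl h'))
              · rcases (hmem n).mp h' with h'' | h''
                · exact Or.inr (List.mem_append_left _ h'')
                · exact Or.inl ((PySem.Set.mem_add basin c n).mpr (Or.inr h''))
            · subst h
              exact Or.inr (List.mem_append_right _ hn)
          rw [ih _ _ hM' hok' hcl'' z]
          constructor
          · rintro (h | ⟨q', hq', h⟩)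
            · rcases (PySem.Set.mem_add basin c z).mp h with h' | h'
              · exact Or.inl h'
              · exact Or.inr ⟨c, (hmem c).mpr (Or.inr rfl), by rw [h']; exact pvComp_refl p hnok⟩
            · rcases List.mem_append.mp hq' with h' | h'
              · exact Or.inr ⟨q', (hmem q').mpr (Or.inl h'), h⟩
              · exact Or.inr ⟨c, (hmem c).mpr (Or.inr rfl), pvComp_head p hnok h' h⟩
          · rintro (h | ⟨q', hq', h⟩)
            · exact Or.inl ((PySem.Set.mem_add basin c z).mpr (Or.inl h))
            · rcases (hmem q').mp hq' with h' | h'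
              · exact Or.inr ⟨q', List.mem_append_left _ h', h⟩
              · have hcz : pvComp p c z := h' ▸ h
                rcases pvComp_cases p hcz with h'' | ⟨n, hn, hcomp⟩
                · exact Or.inl ((PySem.Set.mem_add basin c z).mpr (Or.inr h''))
                · exact Or.inr ⟨n, List.mem_append_right _ hn, hcomp⟩
        · -- skip: out of bounds or value 9
          have hnkey : ∀ z', ¬ pvComp p c z' := fun z' h => hnok h.1
          have hM' : pvM p rest basin < fuel := by
            unfold pvM at hM ⊢; omega
          have hcl' : ∀ b ∈ basin, ∀ n ∈ pvNbrs b, pvOk p n = true → n ∈ basin ∨ n ∈ rest := by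
            intro b hbb n hn hokn
            rcases hcl b hbb n hn hokn with h | h
            · exact Or.inl h
            · rcases (hmem n).mp h with h' | h'
              · exact Or.inr h'
              · exact absurd hokn (h' ▸ (fun hh => hnok hh))
          have hiff : ∀ st : PySem.Set (Int × Int),
              (z ∈ get_basin_at_loop p fuel rest basin ↔
                z ∈ basin ∨ ∃ q ∈ rest, pvComp p q z) →
              (z ∈ get_basin_at_loop p fuel rest basin ↔
                z ∈ basin ∨ ∃ q ∈ q0 :: qs, pvComp p q z) := by
            intro _ hih
            rw [hih]
            constructor
            · rintro (h | ⟨q', hq', h⟩)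
              · exact Or.inl h
              · exact Or.inr ⟨q', (hmem q').mpr (Or.inl hq'), h⟩
            · rintro (h | ⟨q', hq', h⟩)
              · exact Or.inl h
              · rcases (hmem q').mp hq' with h' | h'
                · exact Or.inr ⟨q', h', h⟩
                · exact absurd h (h' ▸ hnkey z)
          by_cases hin : pvInB p c = true
          · have hval : (pvVal p c == 9) = true := by
              by_contra hv
              exact hnok ((pvOk_iff p c).mpr ⟨hin, fun he =>
                hv (by rw [he]; rfl)⟩)
            rw [show (!pvInB p c) = false by rw [hin]; rfl, hval]
            simp only [Bool.false_eq_true, if_false, if_true]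
            exact hiff basin (ih rest basin hM' hok hcl' z)
          · rw [show (!pvInB p c) = true by
              cases h : pvInB p c
              · rfl
              · exact absurd h hin]
            simp only [if_true]
            exact hiff basin (ih rest basin hM' hok hcl' z)

lemma get_basin_at_char (p : List (List Int)) (y x : Int) (z : Int × Int) :
    z ∈ get_basin_at p y x ↔ pvComp p (y, x) z := by
  unfold get_basin_at
  have hM : pvM p [(y, x)] PySem.Set.empty
      < 2 + 5 * (p.length * (PySem.List.pyGetD p 0 []).length) := by
    unfold pvM
    have h1 : ((pvOkList p).filter
        (fun c => !(PySem.Set.empty : PySem.Set (Int × Int)).contains c)).length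
        ≤ (pvCells p).length := by
      calc ((pvOkList p).filter _).length ≤ (pvOkList p).length := List.length_filter_le _ _
        _ ≤ (pvCells p).length := List.length_filter_le _ _
    rw [length_pvCells] at h1
    simp only [List.length_cons, List.length_nil]
    omega
  rw [loopA_char p _ _ _ hM (by intro b hb; cases hb) (by intro b hb; cases hb) z]
  simp

-- ---- B: properties of the initial labelling ----

lemma pvOkList_eq_filter (p : List (List Int)) :
    pvOkList p = (pvCells p).filter (fun c => !(pvVal p c == 9)) := by
  apply List.filter_congr
  intro c hc
  rw [pvOk, (mem_pvCells p c).mp hc, Bool.true_and]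

lemma pvLabel0_eq (p : List (List Int)) :
    pvLabel0 p = (pvOkList p).foldl (fun d c => d.insert c (pvIdx p c)) PySem.Dict.empty := by
  rw [pvOkList_eq_filter, List.foldl_filter]
  rw [pvLabel0]
  congr 1
  funext d c
  cases pvVal p c == 9 <;> simp

lemma items_pvLabel0 (p : List (List Int)) :
    (pvLabel0 p).items = (pvOkList p).map (fun c => (c, pvIdx p c)) := by
  rw [pvLabel0_eq]
  have h := PySem.Dict.items_foldl_insert_fresh (pvOkList p) (fun c => c)
    (fun c => pvIdx p c) PySem.Dict.empty
    (fun a _ => by simp [PySem.Dict.contains_empty])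
    (by simpa using nodup_pvOkList p)
  simpa using h

lemma keys_pvLabel0 (p : List (List Int)) : (pvLabel0 p).keys = pvOkList p := by
  rw [pvLabel0_eq]
  rw [PySem.Dict.keys_foldl_insert (pvOkList p) (fun d c => pvIdx p c) PySem.Dict.empty]
  rw [PySem.Dict.keys_empty, PySem.Set.update_nil_left]
  exact PySem.Set.ofList_eq_self_of_nodup _ (nodup_pvOkList p)

lemma getD_pvLabel0 (p : List (List Int)) {c : Int × Int} (hc : c ∈ pvOkList p) :
    (pvLabel0 p).getD c 0 = pvIdx p c := by
  apply PySem.Dict.getD_of_mem_items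
  · rw [items_pvLabel0]
    exact List.mem_map_of_mem hc
  · rw [keys_pvLabel0]
    exact nodup_pvOkList p

lemma pvIdx_nonneg (p : List (List Int)) {c : Int × Int} (h : pvOk p c = true) :
    0 ≤ pvIdx p c := by
  rw [pvOk_iff] at h
  obtain ⟨h1, _⟩ := h
  rw [pvInB] at h1
  simp only [Bool.and_eq_true, decide_eq_true_eq] at h1
  obtain ⟨⟨⟨hx0, hxw⟩, hy0⟩, hyh⟩ := h1
  rw [pvIdx]
  have : 0 ≤ c.1 * ((PySem.List.pyGetD p 0 []).length : Int) :=
    mul_nonneg hy0 (by positivity)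
  omega

lemma pvIdx_lt (p : List (List Int)) {c : Int × Int} (h : pvOk p c = true) :
    (pvIdx p c).toNat < p.length * (PySem.List.pyGetD p 0 []).length := by
  rw [pvOk_iff] at h
  obtain ⟨h1, _⟩ := h
  rw [pvInB] at h1
  simp only [Bool.and_eq_true, decide_eq_true_eq] at h1
  obtain ⟨⟨⟨hx0, hxw⟩, hy0⟩, hyh⟩ := h1
  rw [pvIdx]
  have key : c.1 * ((PySem.List.pyGetD p 0 []).length : Int) + c.2
      < (p.length : Int) * ((PySem.List.pyGetD p 0 []).length : Int) := by
    have h2 : c.1 * ((PySem.List.pyGetD p 0 []).length : Int) + c.2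
        < (c.1 + 1) * ((PySem.List.pyGetD p 0 []).length : Int) := by ring_nf; omega
    have h3 : (c.1 + 1) * ((PySem.List.pyGetD p 0 []).length : Int)
        ≤ (p.length : Int) * ((PySem.List.pyGetD p 0 []).length : Int) :=
      mul_le_mul_of_nonneg_right (by omega) (by positivity)
    omega
  have h4 : 0 ≤ c.1 * ((PySem.List.pyGetD p 0 []).length : Int) :=
    mul_nonneg hy0 (by positivity)
  have h5 : ((p.length * (PySem.List.pyGetD p 0 []).length : Nat) : Int)
      = (p.length : Int) * ((PySem.List.pyGetD p 0 []).length : Int) := by push_cast; ring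
  omega

lemma pvIdx_inj (p : List (List Int)) {c c' : Int × Int} (h : pvOk p c = true)
    (h' : pvOk p c' = true) (he : pvIdx p c = pvIdx p c') : c = c' := by
  have hb := h
  have hb' := h'
  rw [pvOk_iff] at hb hb'
  obtain ⟨h1, _⟩ := hb
  obtain ⟨h1', _⟩ := hb'
  rw [pvInB] at h1 h1'
  simp only [Bool.and_eq_true, decide_eq_true_eq] at h1 h1'
  obtain ⟨⟨⟨hx0, hxw⟩, hy0⟩, hyh⟩ := h1
  obtain ⟨⟨⟨hx0', hxw'⟩, hy0'⟩, hyh'⟩ := h1'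
  rw [pvIdx, pvIdx] at he
  have hy : c.1 = c'.1 := by
    rcases lt_trichotomy c.1 c'.1 with hlt | heq | hgt
    · exfalso
      have := mul_le_mul_of_nonneg_right (show c.1 + 1 ≤ c'.1 by omega)
        (show (0:Int) ≤ ((PySem.List.pyGetD p 0 []).length : Int) by positivity)
      rw [add_mul, one_mul] at this
      omega
    · exact heq
    · exfalso
      have := mul_le_mul_of_nonneg_right (show c'.1 + 1 ≤ c.1 by omega)
        (show (0:Int) ≤ ((PySem.List.pyGetD p 0 []).length : Int) by positivity)
      rw [add_mul, one_mul] at this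
      omega
  have hx : c.2 = c'.2 := by rw [hy] at he; omega
  exact Prod.ext hy hx

-- ---- B: the sweep loop reaches a fixpoint labelling each cell with the least
--      index of its component ----

def GoodL (p : List (List Int)) (d : PySem.Dict (Int × Int) Int) : Prop :=
  d.keys = pvOkList p ∧
  ∀ c ∈ pvOkList p, ∃ r, pvComp p c r ∧ d.getD c 0 = pvIdx p r ∧ pvIdx p r ≤ pvIdx p c

def FixL (p : List (List Int)) (d : PySem.Dict (Int × Int) Int) : Prop :=
  ∀ c ∈ pvOkList p, ∀ n ∈ pvNbrs c, n ∈ pvOkList p → d.getD c 0 ≤ d.getD n 0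

def sumL (p : List (List Int)) (d : PySem.Dict (Int × Int) Int) : Nat :=
  ((pvOkList p).map (fun c => (d.getD c 0).toNat)).sum

lemma GoodL_label0 (p : List (List Int)) : GoodL p (pvLabel0 p) := by
  refine ⟨keys_pvLabel0 p, ?_⟩
  intro c hc
  exact ⟨c, pvComp_refl p ((mem_pvOkList p c).mp hc), getD_pvLabel0 p hc, le_refl _⟩

lemma get?_getD_of_mem_keys {d : PySem.Dict (Int × Int) Int} {c : Int × Int}
    (h : c ∈ d.keys) : d.get? c = some (d.getD c 0) := by
  have hc := (PySem.Dict.contains_iff_mem_keys d c).mpr h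
  rw [PySem.Dict.contains_eq_isSome_get?] at hc
  obtain ⟨v, hv⟩ := Option.isSome_iff_exists.mp hc
  rw [hv, PySem.Dict.getD_eq_get?_getD, hv]
  rfl

lemma minFold_spec (d : PySem.Dict (Int × Int) Int) (l : List (Int × Int)) (m0 : Int) :
    (l.foldl (fun m n => match d.get? n with
        | some v => if v < m then v else m
        | none => m) m0) ≤ m0 ∧
    ((l.foldl (fun m n => match d.get? n with
        | some v => if v < m then v else m
        | none => m) m0) = m0 ∨
      ∃ n ∈ l, d.get? n = some (l.foldl (fun m n => match d.get? n with
        | some v => if v < m then v else m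
        | none => m) m0)) ∧
    (∀ n ∈ l, ∀ v, d.get? n = some v →
      (l.foldl (fun m n => match d.get? n with
        | some v => if v < m then v else m
        | none => m) m0) ≤ v) := by
  induction l generalizing m0 with
  | nil => exact ⟨le_refl _, Or.inl rfl, by intro n hn; cases hn⟩
  | cons n0 t ih =>
    simp only [List.foldl_cons]
    cases hn0 : d.get? n0 with
    | none =>
      simp only []
      obtain ⟨ih1, ih2, ih3⟩ := ih m0
      refine ⟨ih1, ?_, ?_⟩
      · rcases ih2 with h | ⟨n, hn, hv⟩
        · exact Or.inl h
        · exact Or.inr ⟨n, List.mem_cons_of_mem _ hn, hv⟩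
      · intro n hn v hv
        rcases List.mem_cons.mp hn with rfl | hn'
        · rw [hn0] at hv; cases hv
        · exact ih3 n hn' v hv
    | some v0 =>
      simp only []
      by_cases hlt : v0 < m0
      · rw [if_pos hlt]
        obtain ⟨ih1, ih2, ih3⟩ := ih v0
        refine ⟨le_trans ih1 (le_of_lt hlt), ?_, ?_⟩
        · rcases ih2 with h | ⟨n, hn, hv⟩
          · exact Or.inr ⟨n0, List.mem_cons_self, by rw [hn0, h]⟩
          · exact Or.inr ⟨n, List.mem_cons_of_mem _ hn, hv⟩
        · intro n hn v hv
          rcases List.mem_cons.mp hn with rfl | hn'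
          · rw [hn0] at hv
            injection hv with hv
            exact hv ▸ ih1
          · exact ih3 n hn' v hv
      · rw [if_neg hlt]
        obtain ⟨ih1, ih2, ih3⟩ := ih m0
        refine ⟨ih1, ?_, ?_⟩
        · rcases ih2 with h | ⟨n, hn, hv⟩
          · exact Or.inl h
          · exact Or.inr ⟨n, List.mem_cons_of_mem _ hn, hv⟩
        · intro n hn v hv
          rcases List.mem_cons.mp hn with rfl | hn'
          · rw [hn0] at hv
            injection hv with hv
            omega
          · exact ih3 n hn' v hv

lemma sum_map_le_of_ptwise {l : List (Int × Int)} {f g : (Int × Int) → Nat}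
    (h : ∀ x ∈ l, f x ≤ g x) : (l.map f).sum ≤ (l.map g).sum := by
  induction l with
  | nil => simp
  | cons a t ih =>
    simp only [List.map_cons, List.sum_cons]
    exact Nat.add_le_add (h a List.mem_cons_self)
      (ih (fun x hx => h x (List.mem_cons_of_mem _ hx)))

lemma sum_map_lt_of_ptwise {l : List (Int × Int)} {f g : (Int × Int) → Nat} {c : Int × Int}
    (hl : l.Nodup) (hc : c ∈ l) (h : ∀ x ∈ l, f x ≤ g x) (hlt : f c < g c) :
    (l.map f).sum < (l.map g).sum := by
  induction l with
  | nil => cases hc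
  | cons a t ih =>
    rw [List.nodup_cons] at hl
    simp only [List.map_cons, List.sum_cons]
    rcases List.mem_cons.mp hc with rfl | hct
    · exact Nat.add_lt_add_of_lt_of_le hlt
        (sum_map_le_of_ptwise (fun x hx => h x (List.mem_cons_of_mem _ hx)))
    · exact Nat.add_lt_add_of_le_of_lt (h a List.mem_cons_self)
        (ih hl.2 hct (fun x hx => h x (List.mem_cons_of_mem _ hx)))

lemma pvSweep_main (p : List (List Int)) (d : PySem.Dict (Int × Int) Int) (hG : GoodL p d) :
    GoodL p (pvSweep d).1 ∧
    ((pvSweep d).2 = true → sumL p (pvSweep d).1 < sumL p d) ∧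
    ((pvSweep d).2 = false → (pvSweep d).1 = d) := by
  have hkeys : d.keys = pvOkList p := hG.1
  have aux : ∀ (l : List (Int × Int)), (∀ c ∈ l, c ∈ pvOkList p) →
      ∀ st : PySem.Dict (Int × Int) Int × Bool,
      GoodL p st.1 → (st.2 = false → st.1 = d) → (st.2 = true → sumL p st.1 < sumL p d) →
      GoodL p (l.foldl (fun st c =>
        if pvMinNbr st.1 c (st.1.getD c 0) < st.1.getD c 0 then
          (st.1.insert c (pvMinNbr st.1 c (st.1.getD c 0)), true) else st) st).1 ∧
      ((l.foldl (fun st c =>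
        if pvMinNbr st.1 c (st.1.getD c 0) < st.1.getD c 0 then
          (st.1.insert c (pvMinNbr st.1 c (st.1.getD c 0)), true) else st) st).2 = false →
        (l.foldl (fun st c =>
        if pvMinNbr st.1 c (st.1.getD c 0) < st.1.getD c 0 then
          (st.1.insert c (pvMinNbr st.1 c (st.1.getD c 0)), true) else st) st).1 = d) ∧
      ((l.foldl (fun st c =>
        if pvMinNbr st.1 c (st.1.getD c 0) < st.1.getD c 0 then
          (st.1.insert c (pvMinNbr st.1 c (st.1.getD c 0)), true) else st) st).2 = true →
        sumL p (l.foldl (fun st c =>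
        if pvMinNbr st.1 c (st.1.getD c 0) < st.1.getD c 0 then
          (st.1.insert c (pvMinNbr st.1 c (st.1.getD c 0)), true) else st) st).1 < sumL p d) := by
    intro l
    induction l with
    | nil => intro _ st h1 h2 h3; exact ⟨h1, h2, h3⟩
    | cons c0 t ih =>
      intro hmem st h1 h2 h3
      have hc0 : c0 ∈ pvOkList p := hmem c0 List.mem_cons_self
      simp only [List.foldl_cons]
      by_cases hlt : pvMinNbr st.1 c0 (st.1.getD c0 0) < st.1.getD c0 0
      · rw [if_pos hlt]
        -- the update step
        obtain ⟨hle, hcase, hall⟩ := minFold_spec st.1 (pvNbrs c0) (st.1.getD c0 0)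
        rw [← pvMinNbr] at hle hcase hall
        set m := pvMinNbr st.1 c0 (st.1.getD c0 0) with hm
        rcases hcase with heq | ⟨n, hn, hget⟩
        · exact absurd hlt (by rw [heq]; exact lt_irrefl _)
        · have hnkeys : n ∈ st.1.keys := by
            by_contra hnk
            rw [← PySem.Dict.get?_eq_none_iff_not_mem_keys] at hnk
            rw [hnk] at hget; cases hget
          have hnok : n ∈ pvOkList p := h1.1 ▸ hnkeys
          obtain ⟨r, hcomp, hgetD, hler⟩ := h1.2 n hnok
          have hgn : st.1.getD n 0 = m := by
            rw [PySem.Dict.getD_eq_get?_getD, hget]; rfl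
          have hmr : m = pvIdx p r := by rw [← hgn, hgetD]
          have hokr : pvOk p r = true := pvComp_ok_right p hcomp
          obtain ⟨rc, hcompc, hgetDc, hlerc⟩ := h1.2 c0 hc0
          have hG' : GoodL p (st.1.insert c0 m) := by
            constructor
            · rw [PySem.Dict.keys_insert_of_contains _ _
                ((PySem.Dict.contains_iff_mem_keys _ _).mpr (h1.1 ▸ hc0))]
              exact h1.1
            · intro c hc
              rw [PySem.Dict.getD_insert]
              by_cases hcc : c = c0
              · rw [if_pos hcc]
                subst hcc
                refine ⟨r, pvComp_trans p (pvComp_head p ((mem_pvOkList p c).mp hc)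
                  hn (pvComp_refl p ((mem_pvOkList p n).mp hnok))) hcomp, hmr, ?_⟩
                rw [← hmr]
                calc m ≤ st.1.getD c 0 := le_of_lt hlt
                  _ = pvIdx p rc := hgetDc
                  _ ≤ pvIdx p c := hlerc
              · rw [if_neg hcc]
                exact h1.2 c hc
          have hptw : ∀ x ∈ pvOkList p,
              ((st.1.insert c0 m).getD x 0).toNat ≤ (st.1.getD x 0).toNat := by
            intro x _
            rw [PySem.Dict.getD_insert]
            by_cases hxc : x = c0
            · rw [if_pos hxc]; subst hxc; omega
            · rw [if_neg hxc]
          have hstrict : ((st.1.insert c0 m).getD c0 0).toNat < (st.1.getD c0 0).toNat := by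
            rw [PySem.Dict.getD_insert, if_pos rfl]
            have hm0 : 0 ≤ m := hmr ▸ pvIdx_nonneg p hokr
            omega
          have hsum : sumL p (st.1.insert c0 m) < sumL p st.1 :=
            sum_map_lt_of_ptwise (nodup_pvOkList p) hc0 hptw hstrict
          have hsumd : sumL p (st.1.insert c0 m) < sumL p d := by
            cases hf : st.2
            · rw [← h2 hf]; exact hsum
            · exact lt_trans hsum (h3 hf)
          exact ih (fun c hc => hmem c (List.mem_cons_of_mem _ hc))
            (st.1.insert c0 m, true) hG' (fun h => nomatch h) (fun _ => hsumd)
      · rw [if_neg hlt]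
        exact ih (fun c hc => hmem c (List.mem_cons_of_mem _ hc)) st h1 h2 h3
  have h := aux d.keys (fun c hc => hkeys ▸ hc) (d, false) hG (fun _ => rfl)
    (fun h => nomatch h)
  simpa only [pvSweep] using ⟨h.1, h.2.2, h.2.1⟩

lemma pvSweep_false_fix (p : List (List Int)) (d : PySem.Dict (Int × Int) Int)
    (hG : GoodL p d) (h : (pvSweep d).2 = false) : FixL p d := by
  -- the changed flag is monotone along the sweep
  have aux2 : ∀ (l : List (Int × Int)) (st : PySem.Dict (Int × Int) Int × Bool),
      st.2 = true → (l.foldl (fun st c =>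
        let m := pvMinNbr st.1 c (st.1.getD c 0)
        if m < st.1.getD c 0 then (st.1.insert c m, true) else st) st).2 = true := by
    intro l
    induction l with
    | nil => intro st h; exact h
    | cons c0 t ih =>
      intro st h
      simp only [List.foldl_cons]
      by_cases hlt : pvMinNbr st.1 c0 (st.1.getD c0 0) < st.1.getD c0 0
      · rw [if_pos hlt]; exact ih _ rfl
      · rw [if_neg hlt]; exact ih _ h
  -- if the sweep reports no change, no cell wanted to change
  have aux3 : ∀ (l : List (Int × Int)) (st : PySem.Dict (Int × Int) Int × Bool),
      (l.foldl (fun st c =>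
        let m := pvMinNbr st.1 c (st.1.getD c 0)
        if m < st.1.getD c 0 then (st.1.insert c m, true) else st) st).2 = false →
      ∀ c ∈ l, ¬(pvMinNbr st.1 c (st.1.getD c 0) < st.1.getD c 0) := by
    intro l
    induction l with
    | nil => intro st _ c hc; cases hc
    | cons c0 t ih =>
      intro st hfold c hc
      simp only [List.foldl_cons] at hfold
      by_cases hlt : pvMinNbr st.1 c0 (st.1.getD c0 0) < st.1.getD c0 0
      · rw [if_pos hlt] at hfold
        rw [aux2 t _ rfl] at hfold; cases hfold
      · rw [if_neg hlt] at hfold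
        rcases List.mem_cons.mp hc with rfl | hct
        · exact hlt
        · exact ih st hfold c hct
  intro c hc n hn hnok
  have hnochange : ¬(pvMinNbr d c (d.getD c 0) < d.getD c 0) :=
    aux3 d.keys (d, false) h c (hG.1 ▸ hc)
  obtain ⟨hle, _, hall⟩ := minFold_spec d (pvNbrs c) (d.getD c 0)
  rw [← pvMinNbr] at hle hall
  have heq : pvMinNbr d c (d.getD c 0) = d.getD c 0 := le_antisymm hle (by omega)
  have hgn := get?_getD_of_mem_keys (d := d) (c := n) (hG.1 ▸ hnok)
  have := hall n hn _ hgn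
  rw [heq] at this
  exact this

lemma pvSweeps_fix (p : List (List Int)) : ∀ (fuel : Nat) (d : PySem.Dict (Int × Int) Int),
    sumL p d < fuel → GoodL p d →
    GoodL p (pvSweeps fuel d) ∧ FixL p (pvSweeps fuel d) := by
  intro fuel
  induction fuel with
  | zero => intro d h _; exact absurd h (Nat.not_lt_zero _)
  | succ fuel ih =>
    intro d hsum hG
    rw [show pvSweeps (fuel + 1) d =
      (if (pvSweep d).2 then pvSweeps fuel (pvSweep d).1 else (pvSweep d).1) from rfl]
    obtain ⟨hG', hdec, hsame⟩ := pvSweep_main p d hG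
    cases hc : (pvSweep d).2
    · rw [if_neg (by simp)]
      rw [hsame hc]
      exact ⟨hG, pvSweep_false_fix p d hG (by rw [hc])⟩
    · rw [if_pos rfl]
      exact ih (pvSweep d).1 (by have := hdec hc; omega) hG'

lemma sumL_label0_lt (p : List (List Int)) :
    sumL p (pvLabel0 p) < p.length * (PySem.List.pyGetD p 0 []).length *
      (p.length * (PySem.List.pyGetD p 0 []).length) + 1 := by
  have aux : ∀ (l : List (Int × Int)) (f : (Int × Int) → Nat) (B : Nat),
      (∀ x ∈ l, f x ≤ B) → (l.map f).sum ≤ l.length * B := by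
    intro l f B h
    induction l with
    | nil => simp
    | cons a t ih =>
      simp only [List.map_cons, List.sum_cons, List.length_cons]
      have h1 := h a List.mem_cons_self
      have h2 := ih (fun x hx => h x (List.mem_cons_of_mem _ hx))
      calc f a + (t.map f).sum ≤ B + t.length * B := Nat.add_le_add h1 h2
        _ = (t.length + 1) * B := by ring
  have hbound : ∀ x ∈ pvOkList p, ((pvLabel0 p).getD x 0).toNat
      ≤ p.length * (PySem.List.pyGetD p 0 []).length := by
    intro x hx
    rw [getD_pvLabel0 p hx]
    exact le_of_lt (pvIdx_lt p ((mem_pvOkList p x).mp hx))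
  have h1 := aux (pvOkList p) (fun c => ((pvLabel0 p).getD c 0).toNat) _ hbound
  have h2 : (pvOkList p).length ≤ p.length * (PySem.List.pyGetD p 0 []).length := by
    rw [← length_pvCells]
    exact List.length_filter_le _ _
  have h3 : (pvOkList p).length * (p.length * (PySem.List.pyGetD p 0 []).length)
      ≤ (p.length * (PySem.List.pyGetD p 0 []).length) *
        (p.length * (PySem.List.pyGetD p 0 []).length) :=
    Nat.mul_le_mul_right _ h2
  rw [sumL]
  omega

lemma final_good (p : List (List Int)) : GoodL p (pvFinalLabel p) := by
  rw [pvFinalLabel]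
  exact (pvSweeps_fix p _ _ (sumL_label0_lt p) (GoodL_label0 p)).1

lemma final_fix (p : List (List Int)) : FixL p (pvFinalLabel p) := by
  rw [pvFinalLabel]
  exact (pvSweeps_fix p _ _ (sumL_label0_lt p) (GoodL_label0 p)).2

lemma final_eq_on_comp (p : List (List Int)) {a b : Int × Int} (h : pvComp p a b) :
    (pvFinalLabel p).getD a 0 = (pvFinalLabel p).getD b 0 := by
  obtain ⟨ha, hr⟩ := h
  induction hr with
  | refl => rfl
  | @tail e b h1 step ih =>
    have hoke : pvOk p e = true := pvComp_ok_right p ⟨ha, h1⟩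
    have he : e ∈ pvOkList p := (mem_pvOkList p e).mpr hoke
    have hb : b ∈ pvOkList p := (mem_pvOkList p b).mpr step.1
    have h1' := final_fix p e he b step.2 hb
    have h2' := final_fix p b hb e ((pvNbrs_symm e b).mp step.2) he
    rw [ih]
    omega

lemma final_label_eq_iff (p : List (List Int)) {a b : Int × Int}
    (ha : pvOk p a = true) (hb : pvOk p b = true) :
    (pvFinalLabel p).getD a 0 = (pvFinalLabel p).getD b 0 ↔ pvComp p a b := by
  constructor
  · intro he
    obtain ⟨ra, hca, hga, _⟩ := (final_good p).2 a ((mem_pvOkList p a).mpr ha)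
    obtain ⟨rb, hcb, hgb, _⟩ := (final_good p).2 b ((mem_pvOkList p b).mpr hb)
    have hr : ra = rb := by
      apply pvIdx_inj p (pvComp_ok_right p hca) (pvComp_ok_right p hcb)
      rw [← hga, ← hgb, he]
    exact pvComp_trans p hca (hr ▸ pvComp_symm p hcb)
  · exact final_eq_on_comp p

lemma dict_items_eq (d : PySem.Dict (Int × Int) Int) (h : d.keys.Nodup) :
    d.items = d.keys.map (fun c => (c, d.getD c 0)) := by
  have h1 : d.items.map (fun q => (q.1, d.getD q.1 0)) = d.items := by
    apply List.map_congr_left ?_ |>.trans (List.map_id d.items)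
    intro q hq
    have := PySem.Dict.getD_of_mem_items d (k := q.1) (v := q.2) (by
      rcases q with ⟨k, v⟩; exact hq) h 0
    rw [this]; rfl
  calc d.items = d.items.map (fun q => (q.1, d.getD q.1 0)) := h1.symm
    _ = (d.items.map Prod.fst).map (fun c => (c, d.getD c 0)) := by
        rw [List.map_map]; rfl
    _ = d.keys.map (fun c => (c, d.getD c 0)) := rfl

lemma pvGroups_getD (p : List (List Int)) (v : Int) :
    (pvGroups (pvFinalLabel p)).getD v []
      = (pvOkList p).filter (fun c => (pvFinalLabel p).getD c 0 == v) := by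
  have hnodup : (pvFinalLabel p).keys.Nodup := by
    rw [(final_good p).1]; exact nodup_pvOkList p
  have hitems : (pvFinalLabel p).items
      = (pvOkList p).map (fun c => (c, (pvFinalLabel p).getD c 0)) := by
    rw [dict_items_eq _ hnodup, (final_good p).1]
  rw [pvGroups]
  have hswap : (pvFinalLabel p).items.foldl
      (fun g q => g.modify q.2 [] (· ++ [q.1])) PySem.Dict.empty
      = ((pvFinalLabel p).items.map Prod.swap).foldl
        (fun g q => g.modify q.1 [] (· ++ [q.2])) PySem.Dict.empty := by
    rw [List.foldl_map]; rfl
  rw [hswap, PySem.Dict.getD_foldl_modify_append]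
  rw [hitems]
  rw [List.map_map, List.filter_map]
  rw [List.map_map]
  have hcomp : ((fun q : Int × (Int × Int) => q.1 == v) ∘
      (Prod.swap ∘ fun c : Int × Int => (c, (pvFinalLabel p).getD c 0)))
      = fun c : Int × Int => (pvFinalLabel p).getD c 0 == v := rfl
  have hcomp2 : ((fun q : Int × (Int × Int) => q.2) ∘
      (Prod.swap ∘ fun c : Int × Int => (c, (pvFinalLabel p).getD c 0)))
      = fun c : Int × Int => c := rfl
  rw [hcomp, hcomp2]
  simp [PySem.Dict.getD_empty]

-- ---- the two step functions the outer loops reduce to, and the simulation ----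

-- A's per-cell step, over row-major cells of the rectangle
def sCellA (p : List (List Int)) (st : PySem.Set (Int × Int) × List (List (Int × Int)))
    (c : Int × Int) : PySem.Set (Int × Int) × List (List (Int × Int)) :=
  if st.1.contains c then st
  else if pvVal p c == 9 then st
  else (st.1.union (get_basin_at p c.1 c.2), st.2 ++ [pvCanon p (get_basin_at p c.1 c.2)])

-- A's step restricted to non-9 cells
def sOkA (p : List (List Int)) (st : PySem.Set (Int × Int) × List (List (Int × Int)))
    (c : Int × Int) : PySem.Set (Int × Int) × List (List (Int × Int)) :=
  if st.1.contains c then st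
  else (st.1.union (get_basin_at p c.1 c.2), st.2 ++ [pvCanon p (get_basin_at p c.1 c.2)])

-- B's per-cell step, over the label dict's keys
def sOkB (p : List (List Int)) (st : PySem.Set Int × List (List (Int × Int)))
    (c : Int × Int) : PySem.Set Int × List (List (Int × Int)) :=
  if st.1.contains ((pvFinalLabel p).getD c 0) then st
  else (st.1.add ((pvFinalLabel p).getD c 0),
        st.2 ++ [(pvGroups (pvFinalLabel p)).getD ((pvFinalLabel p).getD c 0) []])

def pvRel (p : List (List Int)) (stA : PySem.Set (Int × Int) × List (List (Int × Int)))
    (stB : PySem.Set Int × List (List (Int × Int))) : Prop :=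
  stA.2 = stB.2 ∧
  ∀ c, c ∈ stA.1 ↔ (pvOk p c = true ∧ (pvFinalLabel p).getD c 0 ∈ stB.1)

lemma canon_eq_group (p : List (List Int)) {c : Int × Int} (hok : pvOk p c = true) :
    pvCanon p (get_basin_at p c.1 c.2)
      = (pvGroups (pvFinalLabel p)).getD ((pvFinalLabel p).getD c 0) [] := by
  have hboole : ∀ (a b : Bool), (a = true ↔ b = true) → a = b := by decide
  rw [pvGroups_getD, pvCanon, pvOkList, List.filter_filter]
  apply List.filter_congr
  intro z hz
  apply hboole
  rw [PySem.Set.contains_iff, Bool.and_eq_true, beq_iff_eq]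
  have hchar := get_basin_at_char p c.1 c.2 z
  have hc' : (c.1, c.2) = c := rfl
  rw [hc'] at hchar
  rw [hchar]
  constructor
  · intro hcomp
    have hokz := pvComp_ok_right p hcomp
    exact ⟨(final_eq_on_comp p hcomp).symm, hokz⟩
  · rintro ⟨heq, hokz⟩
    exact (final_label_eq_iff p hok hokz).mp heq.symm

lemma step_rel (p : List (List Int)) (c : Int × Int) (hok : pvOk p c = true)
    {stA : PySem.Set (Int × Int) × List (List (Int × Int))}
    {stB : PySem.Set Int × List (List (Int × Int))} (hR : pvRel p stA stB) :
    pvRel p (sOkA p stA c) (sOkB p stB c) := by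
  obtain ⟨hout, hmem⟩ := hR
  unfold sOkA sOkB
  by_cases hdone : stB.1.contains ((pvFinalLabel p).getD c 0) = true
  · rw [if_pos hdone]
    have hvis : stA.1.contains c = true := by
      rw [PySem.Set.contains_iff]
      exact (hmem c).mpr ⟨hok, (PySem.Set.contains_iff _ _).mp hdone⟩
    rw [if_pos hvis]
    exact ⟨hout, hmem⟩
  · rw [if_neg hdone]
    have hnvis : ¬ stA.1.contains c = true := by
      intro hc
      rw [PySem.Set.contains_iff] at hc
      exact hdone ((PySem.Set.contains_iff _ _).mpr ((hmem c).mp hc).2)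
    rw [if_neg hnvis]
    constructor
    · simp only
      rw [hout, canon_eq_group p hok]
    · intro z
      simp only
      rw [PySem.Set.mem_union, PySem.Set.mem_add]
      have hchar := get_basin_at_char p c.1 c.2 z
      have hc' : (c.1, c.2) = c := rfl
      rw [hc'] at hchar
      constructor
      · rintro (hz | hz)
        · obtain ⟨hokz, hv⟩ := (hmem z).mp hz
          exact ⟨hokz, Or.inl hv⟩
        · have hcomp := hchar.mp hz
          refine ⟨pvComp_ok_right p hcomp, Or.inr ?_⟩
          exact (final_eq_on_comp p hcomp).symm
      · rintro ⟨hokz, hv | hv⟩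
        · exact Or.inl ((hmem z).mpr ⟨hokz, hv⟩)
        · refine Or.inr (hchar.mpr ?_)
          exact (final_label_eq_iff p hok hokz).mp hv.symm

lemma sim_rel (p : List (List Int)) : ∀ (l : List (Int × Int)),
    (∀ c ∈ l, pvOk p c = true) →
    ∀ {stA stB}, pvRel p stA stB →
    pvRel p (l.foldl (sOkA p) stA) (l.foldl (sOkB p) stB) := by
  intro l
  induction l with
  | nil => intro _ stA stB hR; exact hR
  | cons c t ih =>
    intro hmem stA stB hR
    simp only [List.foldl_cons]
    exact ih (fun c' hc' => hmem c' (List.mem_cons_of_mem _ hc'))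
      (step_rel p c (hmem c List.mem_cons_self) hR)

-- ---- reduction of A's nested enumerate loops to a fold over pvCells ----

lemma pv_foldl_flatMap {α β σ : Type} (l : List α) (g : α → List β) (f : σ → β → σ) :
    ∀ (init : σ), (l.flatMap g).foldl f init = l.foldl (fun s a => (g a).foldl f s) init := by
  induction l with
  | nil => intro init; rfl
  | cons a t ih =>
    intro init
    simp only [List.flatMap_cons, List.foldl_append, List.foldl_cons]
    exact ih _

lemma A_inner_eq (p : List (List Int)) (hP : Pre_get_basins p) (y : Nat) (hy : y < p.length)
    (st : PySem.Set (Int × Int) × List (List (Int × Int))) :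
    (PySem.List.enumerate (PySem.List.pyGetD p ((y : Nat) : Int) []) 0).foldl
      (fun st xp =>
        if st.1.contains (((y : Nat) : Int), xp.1) then st
        else if xp.2 == 9 then st
        else
          let basin := get_basin_at p ((y : Nat) : Int) xp.1
          (st.1.union basin, st.2 ++ [pvCanon p basin])) st
    = (List.range (PySem.List.pyGetD p 0 []).length).foldl
        (fun st x => sCellA p st (((y : Nat) : Int), ((x : Nat) : Int))) st := by
  have hrow : PySem.List.pyGetD p ((y : Nat) : Int) [] = p[y] := by
    rw [PySem.List.pyGetD_natCast]
    exact List.getD_eq_getElem p [] hy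
  have hlen : (PySem.List.pyGetD p ((y : Nat) : Int) []).length
      = (PySem.List.pyGetD p 0 []).length := by
    rw [hrow]
    exact hP _ (List.getElem_mem hy)
  rw [PySem.List.enumerate_eq_map_pyRange (d := (0 : Int)), List.foldl_map,
    PySem.List.pyRange_one]
  simp only [PySem.List.len_eq, sub_zero, Int.toNat_natCast, zero_add, List.foldl_map]
  rw [hlen]
  apply PySem.List.foldl_congr_mem
  intro st' x hx
  rw [List.mem_range, ← hlen] at hx
  show (if st'.1.contains (((y : Nat) : Int), ((x : Nat) : Int)) then st'
    else if PySem.List.pyGetD (PySem.List.pyGetD p ((y : Nat) : Int) []) ((x : Nat) : Int) 0 == 9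
      then st' else _) = _
  rfl

lemma A_eq_cellfold (p : List (List Int)) (hP : Pre_get_basins p)
    (st : PySem.Set (Int × Int) × List (List (Int × Int))) :
    (PySem.List.enumerate p 0).foldl (fun st yr =>
      (PySem.List.enumerate yr.2).foldl
        (fun (st : PySem.Set (Int × Int) × List (List (Int × Int))) xp =>
          if st.1.contains (yr.1, xp.1) then st
          else if xp.2 == 9 then st
          else
            let basin := get_basin_at p yr.1 xp.1
            (st.1.union basin, st.2 ++ [pvCanon p basin])) st) st
    = (pvCells p).foldl (sCellA p) st := by
  rw [PySem.List.enumerate_eq_map_pyRange (d := ([] : List Int)), List.foldl_map,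
    PySem.List.pyRange_one]
  simp only [PySem.List.len_eq, sub_zero, Int.toNat_natCast, zero_add, List.foldl_map]
  rw [pvCells, pv_foldl_flatMap]
  apply PySem.List.foldl_congr_mem
  intro st' y hy
  rw [List.mem_range] at hy
  rw [List.foldl_map]
  exact A_inner_eq p hP y hy st'

-- A's fold over all cells equals the restricted fold over the non-9 cells
lemma A_okfold (p : List (List Int)) (st : PySem.Set (Int × Int) × List (List (Int × Int))) :
    (pvCells p).foldl (sCellA p) st = (pvOkList p).foldl (sOkA p) st := by
  have hfn : sCellA p = fun st c => if !(pvVal p c == 9) then sOkA p st c else st := by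
    funext st c
    by_cases h1 : st.1.contains c = true <;> by_cases h2 : (pvVal p c == 9) = true <;>
      simp [sCellA, sOkA, h2]
  rw [hfn, PySem.List.foldl_if_eq_foldl_filter, ← pvOkList_eq_filter]

-- B's fold over the label's items equals the restricted fold over the non-9 cells
lemma B_okfold (p : List (List Int)) :
    get_basins_alt p = ((pvOkList p).foldl (sOkB p)
      ((PySem.Set.empty : PySem.Set Int), [])).2 := by
  have hnodup : (pvFinalLabel p).keys.Nodup := by
    rw [(final_good p).1]; exact nodup_pvOkList p
  have hitems : (pvFinalLabel p).items
      = (pvOkList p).map (fun c => (c, (pvFinalLabel p).getD c 0)) := by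
    rw [dict_items_eq _ hnodup, (final_good p).1]
  show ((pvFinalLabel p).items.foldl
      (fun (st : PySem.Set Int × List (List (Int × Int))) (q : (Int × Int) × Int) =>
        if st.1.contains q.2 then st
        else (st.1.add q.2, st.2 ++ [(pvGroups (pvFinalLabel p)).getD q.2 []]))
      ((PySem.Set.empty : PySem.Set Int), [])).2 = _
  rw [hitems, List.foldl_map]
  rfl

-- ===== VERDICT (by name: the statement is the Claim_ definition above) =====
theorem get_basins_spec : Claim_equal_get_basins := by
  intro points _ hP
  unfold Spec_get_basins
  have hA : get_basins points
      = ((PySem.List.enumerate points 0).foldl (fun st yr =>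
          (PySem.List.enumerate yr.2).foldl
            (fun (st : PySem.Set (Int × Int) × List (List (Int × Int))) xp =>
              if st.1.contains (yr.1, xp.1) then st
              else if xp.2 == 9 then st
              else
                let basin := get_basin_at points yr.1 xp.1
                (st.1.union basin, st.2 ++ [pvCanon points basin])) st)
          ((PySem.Set.empty : PySem.Set (Int × Int)), [])).2 := rfl
  have hrel : pvRel points
      ((pvOkList points).foldl (sOkA points) ((PySem.Set.empty : PySem.Set (Int × Int)), []))
      ((pvOkList points).foldl (sOkB points) ((PySem.Set.empty : PySem.Set Int), [])) := by
    apply sim_rel points (pvOkList points) (fun c hc => (mem_pvOkList points c).mp hc)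
    constructor
    · rfl
    · intro c
      simp [PySem.Set.empty]
  rw [hA, A_eq_cellfold points hP, A_okfold points, B_okfold points, hrel.1]
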